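-- pv_equiv track=rewrite | github.com/manjusv/Data-Structures-and-Algorithms-in-Python | Strings/AmazingSubarrays.py | amazingSubarrays
-- ===== SOURCE A (Python) =====
-- def amazingSubarrays(S):
--     vowels = ['a', 'e', 'i', 'o', 'u', 'A', 'E', 'I', 'O', 'U']
--     count = 0
--     i = 0
--     while i < len(S):
--         if S[i] in vowels:
--             count += len(S[i:])
--         i += 1
--
--     return count % 10003
-- ===== SOURCE B (Python) =====
-- def amazingSubarrays(S):
--     # total = sum over every prefix of S of the number of vowels in that prefix,
--     # since a vowel at index i is counted once for each of the n - i prefixes ending at >= i.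
--     vowels = frozenset('aeiouAEIOU')
--     total = 0
--     seen = 0
--     for ch in S:
--         if ch in vowels:
--             seen += 1
--         total += seen
--     return total % 10003
-- ===== Notes on version B (the rewrite author's own statement) =====
-- stated objective: faster
-- what changed: Instead of slicing S[i:] at each vowel (A's quadratic pass summing suffix lengths), B makes one pass maintaining a running count of vowels seen so far and adds that prefix count at every position; the identity sum(n-i over vowel i) = sum over prefixes of their vowel count makes it exact, with no indices, lengths or slices used at all.
import Mathlib
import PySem

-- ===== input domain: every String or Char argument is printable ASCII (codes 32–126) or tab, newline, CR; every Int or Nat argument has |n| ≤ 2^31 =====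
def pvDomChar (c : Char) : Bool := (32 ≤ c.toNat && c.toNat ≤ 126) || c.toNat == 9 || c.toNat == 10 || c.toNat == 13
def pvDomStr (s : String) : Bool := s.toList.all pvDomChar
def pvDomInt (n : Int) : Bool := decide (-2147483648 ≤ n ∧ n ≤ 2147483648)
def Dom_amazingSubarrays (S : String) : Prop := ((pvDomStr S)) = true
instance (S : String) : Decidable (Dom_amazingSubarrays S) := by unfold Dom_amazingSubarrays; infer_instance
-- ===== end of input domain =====

-- B replaces A's per-vowel suffix slicing with a single pass adding a running prefix-vowel count: faster.

-- ===== PORT A =====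
-- vowels = ['a', 'e', 'i', 'o', 'u', 'A', 'E', 'I', 'O', 'U']
def pvVowelsA : List Char := ['a', 'e', 'i', 'o', 'u', 'A', 'E', 'I', 'O', 'U']

-- while i < len(S): if S[i] in vowels: count += len(S[i:]); i += 1  — the loop visits i = 0..len-1,
-- so S[i] never raises; ported as a fold over pyRange 0 len 1 (pyGetD's default is never used in range).
def amazingSubarrays (S : String) : Int :=
  let cs := S.toList
  let count : Int :=
    (PySem.List.pyRange 0 (cs.length : Int) 1).foldl
      (fun c i =>
        if PySem.List.pyGetD cs i ' ' ∈ pvVowelsA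
        then c + ((PySem.List.slice cs (some i) none).length : Int)
        else c) 0
  PySem.Int.mod count 10003

-- ===== PORT B =====
-- vowels = frozenset('aeiouAEIOU')
def pvVowelsB : PySem.Set Char := PySem.Set.ofList "aeiouAEIOU".toList

-- for ch in S: if ch in vowels: seen += 1; total += seen  — one fold over the characters
-- carrying the pair (total, seen).
def amazingSubarrays_alt (S : String) : Int :=
  let p : Int × Int :=
    S.toList.foldl
      (fun p ch =>
        let seen := if PySem.Set.contains pvVowelsB ch then p.2 + 1 else p.2
        (p.1 + seen, seen)) (0, 0)
  PySem.Int.mod p.1 10003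

-- ===== PRECONDITION & SPEC =====
def Spec_amazingSubarrays (S : String) (out : Int) : Prop := out = amazingSubarrays_alt S
instance (S : String) (out : Int) : Decidable (Spec_amazingSubarrays S out) := by unfold Spec_amazingSubarrays; infer_instance

-- ===== CLAIM (what is proved, stated in full; the proofs are below) =====
def Claim_equal_amazingSubarrays : Prop := ∀ (S : String), Dom_amazingSubarrays S → Spec_amazingSubarrays S (amazingSubarrays S)

-- ===== LEMMAS AND PROOFS =====

theorem pvVowels_eq : pvVowelsB = pvVowelsA := by decide

-- weighted vowel sum: Wn cs m = Σ over positions j of cs of (m - j) when cs[j] is a vowel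
def pvWn : List Char → Int → Int
  | [], _ => 0
  | c :: r, m => (if PySem.Set.contains pvVowelsB c then m else 0) + pvWn r (m - 1)

-- A's range fold equals the enumerate fold summing (len - i) over vowel positions
theorem pv_A_enum (cs : List Char) :
    (PySem.List.pyRange 0 (cs.length : Int) 1).foldl
      (fun c i =>
        if PySem.List.pyGetD cs i ' ' ∈ pvVowelsA
        then c + ((PySem.List.slice cs (some i) none).length : Int)
        else c) 0
    = (PySem.List.enumerate cs 0).foldl
        (fun acc p => if PySem.Set.contains pvVowelsB p.2 then acc + ((cs.length : Int) - p.1) else acc) 0 := by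
  rw [PySem.List.enumerate_eq_map_pyRange (d := ' '), List.foldl_map]
  apply PySem.List.foldl_congr_mem
  intro acc i hi
  dsimp only
  have hmem := (PySem.List.mem_pyRange_one).mp hi
  have h0 : 0 ≤ i := hmem.1
  have hrange : i < (cs.length : Int) := hmem.2
  rw [PySem.List.slice_from cs h0]
  have hcon : PySem.Set.contains pvVowelsB (PySem.List.pyGetD cs i ' ')
      = decide (PySem.List.pyGetD cs i ' ' ∈ pvVowelsA) := by
    rw [pvVowels_eq]
    simp [PySem.Set.contains]
  rw [hcon]
  have hlen : ((cs.drop i.toNat).length : Int) = (cs.length : Int) - i := by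
    rw [List.length_drop]
    omega
  split_ifs with h1 h2 h2
  · rw [hlen]
  · simp [h1] at h2
  · exact absurd (of_decide_eq_true h2) h1
  · rfl

-- the enumerate fold accumulates pvWn
theorem pv_enum_Wn (n : Int) (cs : List Char) : ∀ (k acc : Int),
    (PySem.List.enumerate cs k).foldl
      (fun acc p => if PySem.Set.contains pvVowelsB p.2 then acc + (n - p.1) else acc) acc
    = acc + pvWn cs (n - k) := by
  induction cs with
  | nil => intro k acc; simp [PySem.List.enumerate_nil, pvWn]
  | cons c r ih =>
      intro k acc
      rw [PySem.List.enumerate_cons, List.foldl_cons]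
      dsimp only
      rw [ih (k + 1)]
      have hw : pvWn (c :: r) (n - k)
          = (if PySem.Set.contains pvVowelsB c then (n - k) else 0) + pvWn r (n - k - 1) := rfl
      have harg : n - (k + 1) = n - k - 1 := by ring
      rw [hw, harg]
      split_ifs <;> ring

-- B's pair fold computes pvWn: first component = t + s·len + pvWn cs len
theorem pv_B_Wn (cs : List Char) : ∀ (t s : Int),
    (cs.foldl
      (fun p ch =>
        let seen := if PySem.Set.contains pvVowelsB ch then p.2 + 1 else p.2
        (p.1 + seen, seen)) (t, s)).1
    = t + s * cs.length + pvWn cs cs.length := by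
  induction cs with
  | nil => intro t s; simp [pvWn]
  | cons c r ih =>
      intro t s
      rw [List.foldl_cons]
      dsimp only
      have hw : pvWn (c :: r) ((c :: r).length : Int)
          = (if PySem.Set.contains pvVowelsB c then ((c :: r).length : Int) else 0)
            + pvWn r (((c :: r).length : Int) - 1) := rfl
      have harg : ((c :: r).length : Int) - 1 = (r.length : Int) := by
        push_cast [List.length_cons]; ring
      rw [hw, harg, ih]
      split_ifs <;> · push_cast [List.length_cons]; ring

-- ===== VERDICT (by name: the statement is the Claim_ definition above) =====
theorem amazingSubarrays_spec : Claim_equal_amazingSubarrays := by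
  intro S _
  unfold Spec_amazingSubarrays amazingSubarrays amazingSubarrays_alt
  dsimp only
  rw [pv_A_enum, pv_enum_Wn, pv_B_Wn]
  norm_num
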